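-- pv_equiv track=rewrite | github.com/juanlucasantoliquido/Stacky | Stacky tools/QA UAT Agent/session_recorder.py | _dedupe_consecutive
-- ===== SOURCE A (Python) =====
-- def _dedupe_consecutive(items: list[str]) -> list[str]:
--     """Collapse consecutive duplicates: ['A','A','B','B','C'] → ['A','B','C']."""
--     out: list[str] = []
--     for item in items:
--         if not item:
--             continue
--         if not out or out[-1] != item:
--             out.append(item)
--     return out
-- ===== SOURCE B (Python) =====
-- def _dedupe_consecutive(items: list[str]) -> list[str]:
--     """Collapse consecutive duplicates, skipping empty strings (divide & conquer)."""
--     return _dc([s for s in items if s])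
--
--
-- def _dc(xs: list[str]) -> list[str]:
--     if len(xs) <= 1:
--         return xs
--     mid = len(xs) // 2
--     left = _dc(xs[:mid])
--     right = _dc(xs[mid:])
--     if left and right and right[0] == left[-1]:
--         right = right[1:]
--     return left + right
-- ===== Notes on version B (the rewrite author's own statement) =====
-- stated objective: alternative
-- what changed: B is a divide-and-conquer: after filtering empties it recursively dedupes each half and joins them, dropping the right half's head when it equals the left half's last element, instead of A's single left-to-right pass comparing each item against the growing output's tail.
import Mathlib
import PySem

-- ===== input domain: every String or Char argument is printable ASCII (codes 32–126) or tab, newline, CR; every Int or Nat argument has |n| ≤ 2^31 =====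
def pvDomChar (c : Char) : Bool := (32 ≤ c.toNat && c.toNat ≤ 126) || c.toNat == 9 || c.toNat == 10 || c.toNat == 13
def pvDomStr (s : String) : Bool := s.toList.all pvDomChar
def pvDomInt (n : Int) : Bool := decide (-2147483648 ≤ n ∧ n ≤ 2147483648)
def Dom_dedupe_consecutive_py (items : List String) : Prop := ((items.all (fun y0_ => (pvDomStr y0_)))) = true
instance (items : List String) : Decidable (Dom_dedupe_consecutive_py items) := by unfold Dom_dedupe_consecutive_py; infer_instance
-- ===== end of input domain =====

-- B replaces A's single accumulator pass by a divide-and-conquer: filter empties, recursively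
-- dedupe each half, join dropping the right half's head when it equals the left half's last
-- element; objective: alternative (same result, different algorithm).


-- ===== PORT A =====
-- A: fold over items; skip empties; append if out is empty or its last element differs.
def dedupe_consecutive_py (items : List String) : List String :=
  items.foldl
    (fun out item =>
      if item = "" then out
      else if out = [] ∨ out.getLast? ≠ some item then out ++ [item]
      else out)
    []

-- ===== PORT B =====
-- B's helper _dc: divide and conquer; split at the midpoint, recurse, and join the halves,
-- dropping the right half's head when it equals the left half's last element.
def pvDC (xs : List String) : List String :=
  if _h : xs.length ≤ 1 then xs
  else
    let mid := xs.length / 2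
    let left := pvDC (xs.take mid)
    let right := pvDC (xs.drop mid)
    left ++ (if left ≠ [] ∧ right ≠ [] ∧ right.head? = left.getLast? then right.tail else right)
termination_by xs.length
decreasing_by
  · simp; omega
  · simp; omega

def dedupe_consecutive_py_alt (items : List String) : List String :=
  pvDC (items.filter (fun s => s ≠ ""))

-- ===== PRECONDITION & SPEC =====
def Spec_dedupe_consecutive_py (items : List String) (out : List String) : Prop := out = dedupe_consecutive_py_alt items
instance (items : List String) (out : List String) : Decidable (Spec_dedupe_consecutive_py items out) := by unfold Spec_dedupe_consecutive_py; infer_instance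

-- ===== CLAIM (what is proved, stated in full; the proofs are below) =====
def Claim_equal_dedupe_consecutive_py : Prop := ∀ (items : List String), Dom_dedupe_consecutive_py items → Spec_dedupe_consecutive_py items (dedupe_consecutive_py items)

-- ===== LEMMAS AND PROOFS =====

-- what A's fold appends after a prefix whose last element is `last`
def pvRun (last : Option String) : List String → List String
  | [] => []
  | x :: xs =>
    if x = "" then pvRun last xs
    else if some x = last then pvRun last xs
    else x :: pvRun (some x) xs

-- pvRun on an empty-free list
def pvRunNE (last : Option String) : List String → List String
  | [] => []
  | x :: xs =>
    if some x = last then pvRunNE last xs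
    else x :: pvRunNE (some x) xs

lemma foldl_eq_run (items : List String) :
    ∀ out : List String,
      items.foldl
        (fun out item =>
          if item = "" then out
          else if out = [] ∨ out.getLast? ≠ some item then out ++ [item]
          else out)
        out = out ++ pvRun out.getLast? items := by
  induction items with
  | nil => intro out; simp [pvRun]
  | cons x xs ih =>
    intro out
    by_cases hx : x = ""
    · simp [List.foldl, hx, pvRun, ih out]
    · by_cases hl : out.getLast? = some x
      · have hout : out ≠ [] := by intro h; subst h; simp at hl
        have hne : ¬ (out = [] ∨ out.getLast? ≠ some x) := by simp [hout, hl]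
        simp only [List.foldl, if_neg hx, if_neg hne]
        rw [ih out, hl]
        simp [pvRun, hx]
      · have h : out = [] ∨ out.getLast? ≠ some x := Or.inr hl
        have hlast : (out ++ [x]).getLast? = some x := by simp
        simp only [List.foldl, if_neg hx, if_pos h, ih (out ++ [x]), hlast]
        have hxl : ¬ some x = out.getLast? := fun h' => hl h'.symm
        simp [pvRun, hx, hxl]

lemma run_eq_runNE (items : List String) :
    ∀ last, pvRun last items = pvRunNE last (items.filter (fun s => s ≠ "")) := by
  induction items with
  | nil => intro last; simp [pvRun, pvRunNE]
  | cons x xs ih =>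
    intro last
    by_cases hx : x = ""
    · simp [pvRun, hx, ih]
    · simp [pvRun, List.filter, hx, pvRunNE, ih]

-- the running `last` after a nonempty prefix is its last element
lemma cons_getLast_or (x : String) (t : List String) (last : Option String) :
    ((x :: t).getLast?).or last = (t.getLast?).or (some x) := by
  cases t with
  | nil => simp
  | cons h t' =>
    rcases hl : (h :: t').getLast? with _ | v
    · exact absurd (List.getLast?_eq_none_iff.mp hl) (by simp)
    · simp [List.getLast?_cons_cons, hl]

lemma pvRunNE_append (xs : List String) :
    ∀ (ys : List String) (last : Option String),
      pvRunNE last (xs ++ ys) = pvRunNE last xs ++ pvRunNE ((xs.getLast?).or last) ys := by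
  induction xs with
  | nil => intro ys last; simp [pvRunNE]
  | cons x t ih =>
    intro ys last
    by_cases h : some x = last
    · simp only [List.cons_append, pvRunNE, if_pos h, ih, cons_getLast_or]
      rw [← h]
    · simp [pvRunNE, h, ih, cons_getLast_or]

lemma pvRunNE_getLast? (t : List String) :
    ∀ a : String, (a :: pvRunNE (some a) t).getLast? = (a :: t).getLast? := by
  induction t with
  | nil => intro a; simp [pvRunNE]
  | cons x t' ih =>
    intro a
    by_cases h : x = a
    · subst h
      simp [pvRunNE, ih x, List.getLast?_cons_cons]
    · have hx : ¬ some x = some a := by simp [h]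
      simp only [pvRunNE, if_neg hx, List.getLast?_cons_cons, ih x]

lemma pvRunNE_cons_none (a : String) (t : List String) :
    pvRunNE none (a :: t) = a :: pvRunNE (some a) t := by
  simp [pvRunNE]

-- the divide-and-conquer join computes pvRunNE's result on the concatenation
lemma merge_lemma (T D : List String) (hT : T ≠ []) (hD : D ≠ []) :
    pvRunNE none (T ++ D) =
      pvRunNE none T ++
        (if pvRunNE none T ≠ [] ∧ pvRunNE none D ≠ [] ∧
            (pvRunNE none D).head? = (pvRunNE none T).getLast? then
          (pvRunNE none D).tail
        else pvRunNE none D) := by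
  obtain ⟨a, t, rfl⟩ := List.exists_cons_of_ne_nil hT
  obtain ⟨d, ds, rfl⟩ := List.exists_cons_of_ne_nil hD
  rw [List.cons_append, pvRunNE_cons_none, pvRunNE_append, pvRunNE_cons_none,
    pvRunNE_cons_none]
  have hL : (a :: pvRunNE (some a) t).getLast? = (t.getLast?).or (some a) := by
    rw [pvRunNE_getLast?]
    cases t with
    | nil => simp
    | cons h t' =>
      rcases hl : (h :: t').getLast? with _ | v
      · exact absurd (List.getLast?_eq_none_iff.mp hl) (by simp)
      · simp [List.getLast?_cons_cons, hl]
  obtain ⟨c, hc⟩ : ∃ c, (t.getLast?).or (some a) = some c := by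
    cases h : t.getLast? with
    | none => exact ⟨a, rfl⟩
    | some v => exact ⟨v, rfl⟩
  by_cases hdc : d = c
  · subst hdc
    have hcond : (d :: pvRunNE (some d) ds).head? = (a :: pvRunNE (some a) t).getLast? := by
      simp [hL, hc]
    rw [if_pos ⟨by simp, by simp, hcond⟩]
    simp [hc, pvRunNE]
  · have hcond : ¬((a :: pvRunNE (some a) t) ≠ [] ∧ (d :: pvRunNE (some d) ds) ≠ [] ∧
        (d :: pvRunNE (some d) ds).head? = (a :: pvRunNE (some a) t).getLast?) := by
      rw [hL, hc]
      intro hcontra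
      exact hdc (by simpa using hcontra.2.2)
    rw [if_neg hcond]
    have hne : ¬ some d = (t.getLast?).or (some a) := by simp [hc, hdc]
    simp only [hc] at hne ⊢
    simp [pvRunNE, hne]

theorem pvDC_eq (xs : List String) : pvDC xs = pvRunNE none xs := by
  rw [pvDC]
  by_cases h : xs.length ≤ 1
  · rw [dif_pos h]
    match xs, h with
    | [], _ => simp [pvRunNE]
    | [x], _ => simp [pvRunNE]
  · rw [dif_neg h]
    show pvDC (xs.take (xs.length / 2)) ++
        (if pvDC (xs.take (xs.length / 2)) ≠ [] ∧ pvDC (xs.drop (xs.length / 2)) ≠ [] ∧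
            (pvDC (xs.drop (xs.length / 2))).head? = (pvDC (xs.take (xs.length / 2))).getLast?
         then (pvDC (xs.drop (xs.length / 2))).tail
         else pvDC (xs.drop (xs.length / 2))) = pvRunNE none xs
    have hmid1 : 1 ≤ xs.length / 2 := by omega
    have hmidlt : xs.length / 2 < xs.length := by omega
    have hT : xs.take (xs.length / 2) ≠ [] := by
      intro hnil
      have h0 : (xs.take (xs.length / 2)).length = 0 := by rw [hnil]; rfl
      rw [List.length_take] at h0
      omega
    have hD : xs.drop (xs.length / 2) ≠ [] := by
      intro hnil
      have h0 : (xs.drop (xs.length / 2)).length = 0 := by rw [hnil]; rfl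
      rw [List.length_drop] at h0
      omega
    have ih1 := pvDC_eq (xs.take (xs.length / 2))
    have ih2 := pvDC_eq (xs.drop (xs.length / 2))
    simp only [ih1, ih2]
    conv_rhs => rw [← List.take_append_drop (xs.length / 2) xs]
    rw [merge_lemma _ _ hT hD]
termination_by xs.length
decreasing_by
  · simp; omega
  · simp; omega

-- ===== VERDICT (by name: the statement is the Claim_ definition above) =====
theorem dedupe_consecutive_py_spec : Claim_equal_dedupe_consecutive_py := by
  intro items _
  unfold Spec_dedupe_consecutive_py dedupe_consecutive_py dedupe_consecutive_py_alt
  rw [foldl_eq_run items []]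
  simp only [List.getLast?_nil, List.nil_append]
  rw [run_eq_runNE, pvDC_eq]
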